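-- pv_equiv track=rewrite | github.com/ben273824/NFLData | NFLscraping.py | shareConference
-- ===== SOURCE A (Python) =====
-- teamNames = {'BUF':'Buffalo Bills', 'NE':'New England Patriots', 'MIA': 'Miami Dolphins', 'NYJ':'New York Jets', 'TEN':'Tennessee Titans',
-- 'IND':'Indianapolis Colts', 'HOU':'Houston Texans', 'JAX':'Jacksonville Jaguars', 'CIN':'Cincinnati Bengals',
--             'PIT':'Pittsburgh Steelers', 'CLE':'Cleveland Browns', 'BAL':'Baltimore Ravens', 'KC':'Kansas City Chiefs',
--             'OAK':'Oakland Raiders', 'LAC':'Los Angeles Chargers', 'SD':'San Diego Chargers', 'DEN':'Denver Broncos', 'DAL':'Dallas Cowboys',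
--             'PHI':'Philadelphia Eagles', 'WAS':'Washington Redskins',
--             'NYG':'New York Giants', 'TB':'Tampa Bay Buccaneers', 'NO':'New Orleans Saints',
--             'ATL':'Atlanta Falcons', 'CAR':'Carolina Panthers', 'GB':'Green Bay Packers', 'MIN':'Minnesota Vikings',
--             'CHI':'Chicago Bears', 'DET':'Detroit Lions', 'LAR':'Los Angeles Rams', 'STL':'St. Louis Rams',
--             'ARI':'Arizona Cardinals', 'SF':'San Francisco 49ers', 'SEA':'Seattle Seahawks'}
--
-- def shareConference(teamCode, team2, year):
--     Conferences = None
--     team1 = teamNames[teamCode]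
--     if year == '2001':
--         Conferences = [['New England Patriots', 'Miami Dolphins', 'New York Jets', 'Indianapolis Colts', 'Buffalo Bills',
--         'Pittsburgh Steelers', 'Baltimore Ravens', 'Cleveland Browns', 'Tennessee Titans', 'Jacksonville Jaguars', 'Cincinnati Bengals',
--         'Oakland Raiders', 'Seattle Seahawks', 'Denver Broncos', 'Kansas City Chiefs', 'San Diego Chargers'],
--         ['Philadelphia Eagles', 'Washington Redskins', 'New York Giants', 'Arizona Cardinals', 'Dallas Cowboys',
--         'Chicago Bears', 'Green Bay Packers', 'Tampa Bay Buccaneers', 'Minnesota Vikings', 'Detroit Lions',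
--         'St. Louis Rams', 'San Francisco 49ers', 'New Orleans Saints', 'Atlanta Falcons', 'Carolina Panthers']]
--     else:
--         Conferences = [['New England Patriots', 'Miami Dolphins', 'New York Jets', 'Buffalo Bills',
--         'Pittsburgh Steelers', 'Baltimore Ravens', 'Cleveland Browns', 'Cincinnati Bengals',
--         'Tennessee Titans', 'Indianapolis Colts', 'Jacksonville Jaguars', 'Houston Texans',
--         'Oakland Raiders', 'Denver Broncos', 'Kansas City Chiefs', 'San Diego Chargers', 'Los Angeles Chargers'],
--         ['Philadelphia Eagles', 'Washington Redskins', 'New York Giants', 'Dallas Cowboys',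
--         'Chicago Bears', 'Green Bay Packers', 'Minnesota Vikings', 'Detroit Lions',
--         'Tampa Bay Buccaneers', 'Atlanta Falcons', 'New Orleans Saints', 'Carolina Panthers',
--         'St. Louis Rams', 'Los Angeles Rams', 'San Francisco 49ers', 'Seattle Seahawks', 'Arizona Cardinals']]
--     for Conference in Conferences:
--         if (team1 in Conference) and (team2 in Conference):
--             return True
--     return False
-- ===== SOURCE B (Python) =====
-- teamNames = {'BUF':'Buffalo Bills', 'NE':'New England Patriots', 'MIA': 'Miami Dolphins', 'NYJ':'New York Jets', 'TEN':'Tennessee Titans',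
-- 'IND':'Indianapolis Colts', 'HOU':'Houston Texans', 'JAX':'Jacksonville Jaguars', 'CIN':'Cincinnati Bengals',
--             'PIT':'Pittsburgh Steelers', 'CLE':'Cleveland Browns', 'BAL':'Baltimore Ravens', 'KC':'Kansas City Chiefs',
--             'OAK':'Oakland Raiders', 'LAC':'Los Angeles Chargers', 'SD':'San Diego Chargers', 'DEN':'Denver Broncos', 'DAL':'Dallas Cowboys',
--             'PHI':'Philadelphia Eagles', 'WAS':'Washington Redskins',
--             'NYG':'New York Giants', 'TB':'Tampa Bay Buccaneers', 'NO':'New Orleans Saints',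
--             'ATL':'Atlanta Falcons', 'CAR':'Carolina Panthers', 'GB':'Green Bay Packers', 'MIN':'Minnesota Vikings',
--             'CHI':'Chicago Bears', 'DET':'Detroit Lions', 'LAR':'Los Angeles Rams', 'STL':'St. Louis Rams',
--             'ARI':'Arizona Cardinals', 'SF':'San Francisco 49ers', 'SEA':'Seattle Seahawks'}
--
-- AFC_2001 = ['New England Patriots', 'Miami Dolphins', 'New York Jets', 'Indianapolis Colts', 'Buffalo Bills',
--         'Pittsburgh Steelers', 'Baltimore Ravens', 'Cleveland Browns', 'Tennessee Titans', 'Jacksonville Jaguars', 'Cincinnati Bengals',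
--         'Oakland Raiders', 'Seattle Seahawks', 'Denver Broncos', 'Kansas City Chiefs', 'San Diego Chargers']
-- NFC_2001 = ['Philadelphia Eagles', 'Washington Redskins', 'New York Giants', 'Arizona Cardinals', 'Dallas Cowboys',
--         'Chicago Bears', 'Green Bay Packers', 'Tampa Bay Buccaneers', 'Minnesota Vikings', 'Detroit Lions',
--         'St. Louis Rams', 'San Francisco 49ers', 'New Orleans Saints', 'Atlanta Falcons', 'Carolina Panthers']
-- AFC_DEF = ['New England Patriots', 'Miami Dolphins', 'New York Jets', 'Buffalo Bills',
--         'Pittsburgh Steelers', 'Baltimore Ravens', 'Cleveland Browns', 'Cincinnati Bengals',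
--         'Tennessee Titans', 'Indianapolis Colts', 'Jacksonville Jaguars', 'Houston Texans',
--         'Oakland Raiders', 'Denver Broncos', 'Kansas City Chiefs', 'San Diego Chargers', 'Los Angeles Chargers']
-- NFC_DEF = ['Philadelphia Eagles', 'Washington Redskins', 'New York Giants', 'Dallas Cowboys',
--         'Chicago Bears', 'Green Bay Packers', 'Minnesota Vikings', 'Detroit Lions',
--         'Tampa Bay Buccaneers', 'Atlanta Falcons', 'New Orleans Saints', 'Carolina Panthers',
--         'St. Louis Rams', 'Los Angeles Rams', 'San Francisco 49ers', 'Seattle Seahawks', 'Arizona Cardinals']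
--
-- def shareConference(teamCode, team2, year):
--     team1 = teamNames[teamCode]
--     afc, nfc = (AFC_2001, NFC_2001) if year == '2001' else (AFC_DEF, NFC_DEF)
--     m = {t: 0 for t in afc}
--     for t in nfc:
--         m[t] = 1
--     c1 = m.get(team1)
--     return c1 is not None and c1 == m.get(team2)
-- ===== Notes on version B (the rewrite author's own statement) =====
-- stated objective: idiomatic
-- what changed: Replaces the loop over the list of conference rosters (with two linear membership scans per conference) by a single name-to-conference-id dict built once; the answer is two dict lookups compared for equality, with a None guard for teams in no conference.
import Mathlib
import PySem

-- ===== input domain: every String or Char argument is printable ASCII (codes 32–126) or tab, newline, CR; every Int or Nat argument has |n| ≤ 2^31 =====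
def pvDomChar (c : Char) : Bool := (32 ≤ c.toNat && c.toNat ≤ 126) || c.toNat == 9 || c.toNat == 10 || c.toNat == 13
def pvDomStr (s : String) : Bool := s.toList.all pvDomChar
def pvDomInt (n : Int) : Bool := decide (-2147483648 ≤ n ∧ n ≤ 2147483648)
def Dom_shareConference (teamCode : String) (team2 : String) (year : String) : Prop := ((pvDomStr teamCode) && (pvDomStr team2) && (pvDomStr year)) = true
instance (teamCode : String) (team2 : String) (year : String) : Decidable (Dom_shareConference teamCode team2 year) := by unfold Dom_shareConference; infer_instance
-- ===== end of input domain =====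

-- B replaces A's loop over conference rosters by one name→conference-id dict built once and two lookups (idiomatic; same cost).

-- module-level teamNames dict, shared by both Pythons
def pvTeamNames : PySem.Dict String String := PySem.Dict.ofList
  [("BUF","Buffalo Bills"), ("NE","New England Patriots"), ("MIA","Miami Dolphins"), ("NYJ","New York Jets"),
   ("TEN","Tennessee Titans"), ("IND","Indianapolis Colts"), ("HOU","Houston Texans"), ("JAX","Jacksonville Jaguars"),
   ("CIN","Cincinnati Bengals"), ("PIT","Pittsburgh Steelers"), ("CLE","Cleveland Browns"), ("BAL","Baltimore Ravens"),
   ("KC","Kansas City Chiefs"), ("OAK","Oakland Raiders"), ("LAC","Los Angeles Chargers"), ("SD","San Diego Chargers"),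
   ("DEN","Denver Broncos"), ("DAL","Dallas Cowboys"), ("PHI","Philadelphia Eagles"), ("WAS","Washington Redskins"),
   ("NYG","New York Giants"), ("TB","Tampa Bay Buccaneers"), ("NO","New Orleans Saints"), ("ATL","Atlanta Falcons"),
   ("CAR","Carolina Panthers"), ("GB","Green Bay Packers"), ("MIN","Minnesota Vikings"), ("CHI","Chicago Bears"),
   ("DET","Detroit Lions"), ("LAR","Los Angeles Rams"), ("STL","St. Louis Rams"), ("ARI","Arizona Cardinals"),
   ("SF","San Francisco 49ers"), ("SEA","Seattle Seahawks")]

-- ===== PORT A =====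
-- A: team1 = teamNames[teamCode] (KeyError excluded by Pre_), build Conferences, loop with early return.
def shareConference (teamCode : String) (team2 : String) (year : String) : Bool :=
  match pvTeamNames.get? teamCode with
  | none => false  -- Python raises KeyError here; excluded by Pre_shareConference
  | some team1 =>
    let Conferences : List (List String) :=
      if year == "2001" then
        [["New England Patriots", "Miami Dolphins", "New York Jets", "Indianapolis Colts", "Buffalo Bills",
          "Pittsburgh Steelers", "Baltimore Ravens", "Cleveland Browns", "Tennessee Titans", "Jacksonville Jaguars", "Cincinnati Bengals",
          "Oakland Raiders", "Seattle Seahawks", "Denver Broncos", "Kansas City Chiefs", "San Diego Chargers"],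
         ["Philadelphia Eagles", "Washington Redskins", "New York Giants", "Arizona Cardinals", "Dallas Cowboys",
          "Chicago Bears", "Green Bay Packers", "Tampa Bay Buccaneers", "Minnesota Vikings", "Detroit Lions",
          "St. Louis Rams", "San Francisco 49ers", "New Orleans Saints", "Atlanta Falcons", "Carolina Panthers"]]
      else
        [["New England Patriots", "Miami Dolphins", "New York Jets", "Buffalo Bills",
          "Pittsburgh Steelers", "Baltimore Ravens", "Cleveland Browns", "Cincinnati Bengals",
          "Tennessee Titans", "Indianapolis Colts", "Jacksonville Jaguars", "Houston Texans",
          "Oakland Raiders", "Denver Broncos", "Kansas City Chiefs", "San Diego Chargers", "Los Angeles Chargers"],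
         ["Philadelphia Eagles", "Washington Redskins", "New York Giants", "Dallas Cowboys",
          "Chicago Bears", "Green Bay Packers", "Minnesota Vikings", "Detroit Lions",
          "Tampa Bay Buccaneers", "Atlanta Falcons", "New Orleans Saints", "Carolina Panthers",
          "St. Louis Rams", "Los Angeles Rams", "San Francisco 49ers", "Seattle Seahawks", "Arizona Cardinals"]]
    Conferences.any (fun Conference => Conference.contains team1 && Conference.contains team2)

-- ===== PORT B =====
-- B's module-level roster constants
def pvAFC2001 : List String :=
  ["New England Patriots", "Miami Dolphins", "New York Jets", "Indianapolis Colts", "Buffalo Bills",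
   "Pittsburgh Steelers", "Baltimore Ravens", "Cleveland Browns", "Tennessee Titans", "Jacksonville Jaguars", "Cincinnati Bengals",
   "Oakland Raiders", "Seattle Seahawks", "Denver Broncos", "Kansas City Chiefs", "San Diego Chargers"]
def pvNFC2001 : List String :=
  ["Philadelphia Eagles", "Washington Redskins", "New York Giants", "Arizona Cardinals", "Dallas Cowboys",
   "Chicago Bears", "Green Bay Packers", "Tampa Bay Buccaneers", "Minnesota Vikings", "Detroit Lions",
   "St. Louis Rams", "San Francisco 49ers", "New Orleans Saints", "Atlanta Falcons", "Carolina Panthers"]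
def pvAFCDef : List String :=
  ["New England Patriots", "Miami Dolphins", "New York Jets", "Buffalo Bills",
   "Pittsburgh Steelers", "Baltimore Ravens", "Cleveland Browns", "Cincinnati Bengals",
   "Tennessee Titans", "Indianapolis Colts", "Jacksonville Jaguars", "Houston Texans",
   "Oakland Raiders", "Denver Broncos", "Kansas City Chiefs", "San Diego Chargers", "Los Angeles Chargers"]
def pvNFCDef : List String :=
  ["Philadelphia Eagles", "Washington Redskins", "New York Giants", "Dallas Cowboys",
   "Chicago Bears", "Green Bay Packers", "Minnesota Vikings", "Detroit Lions",
   "Tampa Bay Buccaneers", "Atlanta Falcons", "New Orleans Saints", "Carolina Panthers",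
   "St. Louis Rams", "Los Angeles Rams", "San Francisco 49ers", "Seattle Seahawks", "Arizona Cardinals"]

-- B: dict comprehension over the AFC roster (id 0), then the NFC loop overwrites/adds id 1; two lookups.
def shareConference_alt (teamCode : String) (team2 : String) (year : String) : Bool :=
  match pvTeamNames.get? teamCode with
  | none => false  -- Python raises KeyError here; excluded by Pre_shareConference
  | some team1 =>
    let afc : List String := if year == "2001" then pvAFC2001 else pvAFCDef
    let nfc : List String := if year == "2001" then pvNFC2001 else pvNFCDef
    let m0 : PySem.Dict String Int := afc.foldl (fun d t => d.insert t 0) PySem.Dict.empty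
    let m : PySem.Dict String Int := nfc.foldl (fun d t => d.insert t 1) m0
    match m.get? team1 with
    | none => false
    | some c1 => m.get? team2 == some c1

-- ===== PRECONDITION & SPEC =====
-- Pre_: teamCode must be a known team code, otherwise teamNames[teamCode] raises KeyError in both Pythons.
def Pre_shareConference (teamCode : String) (team2 : String) (year : String) : Prop :=
  pvTeamNames.contains teamCode = true
instance (teamCode : String) (team2 : String) (year : String) : Decidable (Pre_shareConference teamCode team2 year) := by unfold Pre_shareConference; infer_instance
def pvWitness_shareConference : String × String × String := ("NE", "Miami Dolphins", "2001")

def Spec_shareConference (teamCode : String) (team2 : String) (year : String) (out : Bool) : Prop := out = shareConference_alt teamCode team2 year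
instance (teamCode : String) (team2 : String) (year : String) (out : Bool) : Decidable (Spec_shareConference teamCode team2 year out) := by unfold Spec_shareConference; infer_instance

-- ===== CLAIM (what is proved, stated in full; the proofs are below) =====
def Claim_equal_shareConference : Prop := ∀ (teamCode : String) (team2 : String) (year : String), Dom_shareConference teamCode team2 year → Pre_shareConference teamCode team2 year → Spec_shareConference teamCode team2 year (shareConference teamCode team2 year)

-- ===== LEMMAS AND PROOFS =====

/-- Looking up after folding `insert · v` over a list: hit iff the key is in the list. -/
theorem get?_foldl_insert_const (v : Int) (l : List String) (d : PySem.Dict String Int) (k : String) :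
    (l.foldl (fun d t => d.insert t v) d).get? k = if k ∈ l then some v else d.get? k := by
  induction l generalizing d with
  | nil => simp
  | cons x xs ih =>
    simp only [List.foldl_cons, ih, PySem.Dict.get?_insert, List.mem_cons]
    by_cases hx : k = x <;> by_cases hxs : k ∈ xs <;> simp [hx, hxs]

/-- The core: A's loop over disjoint rosters equals B's dict of conference ids. -/
theorem core_eq (a b : List String) (hdisj : ∀ t, t ∈ a → t ∉ b) (t1 t2 : String) :
    [a, b].any (fun c => c.contains t1 && c.contains t2) =
    (match (b.foldl (fun d t => d.insert t 1)
              (a.foldl (fun d t => d.insert t (0 : Int)) PySem.Dict.empty)).get? t1 with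
     | none => false
     | some c1 => (b.foldl (fun d t => d.insert t 1)
              (a.foldl (fun d t => d.insert t (0 : Int)) PySem.Dict.empty)).get? t2 == some c1) := by
  have hm : ∀ k, (b.foldl (fun d t => d.insert t 1)
              (a.foldl (fun d t => d.insert t (0 : Int)) PySem.Dict.empty)).get? k =
      if k ∈ b then some 1 else if k ∈ a then some 0 else none := by
    intro k
    rw [get?_foldl_insert_const, get?_foldl_insert_const]
    simp [PySem.Dict.get?_empty]
  simp only [hm, List.any_cons, List.any_nil, Bool.or_false]
  by_cases h1b : t1 ∈ b <;> by_cases h1a : t1 ∈ a <;>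
    by_cases h2b : t2 ∈ b <;> by_cases h2a : t2 ∈ a <;>
    first
      | (exact absurd h1b (hdisj _ h1a))
      | (exact absurd h2b (hdisj _ h2a))
      | simp [h1a, h1b, h2a, h2b, List.contains_eq_mem]

-- ===== VERDICT (by name: the statement is the Claim_ definition above) =====
theorem shareConference_spec : Claim_equal_shareConference := by
  intro teamCode team2 year _ _
  unfold Spec_shareConference shareConference shareConference_alt
  cases h : pvTeamNames.get? teamCode with
  | none => rfl
  | some team1 =>
    simp only
    by_cases hy : year == "2001"
    · simp only [hy, if_true]
      exact core_eq pvAFC2001 pvNFC2001 (by decide) team1 team2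
    · simp only [hy, if_false, Bool.false_eq_true]
      exact core_eq pvAFCDef pvNFCDef (by decide) team1 team2
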